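-- pv_equiv track=rewrite | github.com/kaczub/konkurs | moje/gazetka.py | licz_cyf_cenz
-- ===== SOURCE A (Python) =====
-- def licz_cyf_cenz(wejscie):
--     litery = 0
--     cyfry = 0
--     ocenzurowane_znaki = 0
--     for znak in wejscie:
--         if znak.isalpha():
--             litery += 1
--         if znak.isdigit():
--             cyfry += 1
--         if znak == "*":
--             ocenzurowane_znaki += 1
--
--     return litery, cyfry, ocenzurowane_znaki
-- ===== SOURCE B (Python) =====
-- def licz_cyf_cenz(wejscie):
--     # Frequency table first, then weighted sums over distinct characters.
--     freq = {}
--     for znak in wejscie: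
--         freq[znak] = freq.get(znak, 0) + 1
--     litery = sum(n for ch, n in freq.items() if ch.isalpha())
--     cyfry = sum(n for ch, n in freq.items() if ch.isdigit())
--     return litery, cyfry, freq.get("*", 0)
-- ===== Notes on version B (the rewrite author's own statement) =====
-- stated objective: alternative
-- what changed: B builds a character-frequency table in one pass and computes each of the three counts as a weighted sum over the distinct characters (and a single lookup for '*'), instead of A's per-character triple of running counters.
import Mathlib
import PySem

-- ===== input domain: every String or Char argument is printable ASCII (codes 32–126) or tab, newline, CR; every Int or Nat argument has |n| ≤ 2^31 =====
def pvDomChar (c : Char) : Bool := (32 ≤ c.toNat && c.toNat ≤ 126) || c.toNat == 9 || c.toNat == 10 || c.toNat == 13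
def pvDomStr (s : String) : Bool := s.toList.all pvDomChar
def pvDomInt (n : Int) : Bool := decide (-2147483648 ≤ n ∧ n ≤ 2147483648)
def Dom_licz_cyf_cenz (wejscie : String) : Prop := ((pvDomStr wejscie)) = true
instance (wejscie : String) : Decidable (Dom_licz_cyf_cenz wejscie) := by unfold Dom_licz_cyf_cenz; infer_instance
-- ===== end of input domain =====

-- B replaces A's per-character triple of running counters by a frequency table plus
-- weighted sums over the distinct characters (objective: alternative decomposition).

-- ===== PORT A =====
def licz_cyf_cenz (wejscie : String) : Int × Int × Int :=
  wejscie.toList.foldl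
    (fun acc znak =>
      let litery := if PySem.Chars.isalpha znak then acc.1 + 1 else acc.1
      let cyfry := if PySem.Chars.isdigit znak then acc.2.1 + 1 else acc.2.1
      let ocenzurowane := if znak == '*' then acc.2.2 + 1 else acc.2.2
      (litery, cyfry, ocenzurowane))
    (0, 0, 0)

-- ===== PORT B =====
def licz_cyf_cenz_alt (wejscie : String) : Int × Int × Int :=
  let freq : PySem.Dict Char Int :=
    wejscie.toList.foldl (fun d znak => d.insert znak (d.getD znak 0 + 1)) PySem.Dict.empty
  let litery := ((freq.items.filter (fun p => PySem.Chars.isalpha p.1)).map (·.2)).sum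
  let cyfry := ((freq.items.filter (fun p => PySem.Chars.isdigit p.1)).map (·.2)).sum
  (litery, cyfry, freq.getD '*' 0)

-- ===== PRECONDITION & SPEC =====
def Spec_licz_cyf_cenz (wejscie : String) (out : Int × Int × Int) : Prop := out = licz_cyf_cenz_alt wejscie
instance (wejscie : String) (out : Int × Int × Int) : Decidable (Spec_licz_cyf_cenz wejscie out) := by unfold Spec_licz_cyf_cenz; infer_instance

-- ===== CLAIM (what is proved, stated in full; the proofs are below) =====
def Claim_equal_licz_cyf_cenz : Prop := ∀ (wejscie : String), Dom_licz_cyf_cenz wejscie → Spec_licz_cyf_cenz wejscie (licz_cyf_cenz wejscie)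

-- ===== LEMMAS AND PROOFS =====

-- A's fold accumulates the three counts.
theorem foldA_eq (xs : List Char) (a b c : Int) :
    xs.foldl
      (fun acc znak =>
        let litery := if PySem.Chars.isalpha znak then acc.1 + 1 else acc.1
        let cyfry := if PySem.Chars.isdigit znak then acc.2.1 + 1 else acc.2.1
        let ocenzurowane := if znak == '*' then acc.2.2 + 1 else acc.2.2
        (litery, cyfry, ocenzurowane))
      (a, b, c)
    = (a + (xs.countP PySem.Chars.isalpha : Int),
       b + (xs.countP PySem.Chars.isdigit : Int),
       c + (xs.count '*' : Int)) := by
  induction xs generalizing a b c with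
  | nil => simp
  | cons x xs ih =>
      simp only [List.foldl_cons, ih, List.countP_cons, List.count_cons]
      split_ifs with h1 h2 h3 h2 h3 h3 h3 <;>
        simp_all [Prod.ext_iff, beq_iff_eq] <;> omega

-- Indicator sum over a nodup list.
theorem indicator_sum (x : Char) (P : Char → Bool) (S : List Char) (hnd : S.Nodup) :
    ((S.filter P).map (fun s => if s == x then (1 : Int) else 0)).sum
      = if P x = true ∧ x ∈ S then 1 else 0 := by
  rw [PySem.List.sum_map_ite_one_zero]
  rw [show (S.filter P).countP (fun s => s == x) = (S.filter P).count x from rfl]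
  by_cases hmem : P x = true ∧ x ∈ S
  · rw [if_pos hmem,
      List.count_eq_one_of_mem (hnd.filter P) (List.mem_filter.mpr ⟨hmem.2, hmem.1⟩)]
    rfl
  · rw [if_neg hmem, List.count_eq_zero_of_not_mem
      (fun h => hmem ⟨(List.mem_filter.mp h).2, (List.mem_filter.mp h).1⟩)]
    rfl

-- Weighted sum over a nodup covering list of distinct characters counts xs.
theorem weighted_sum (P : Char → Bool) (xs S : List Char) (hnd : S.Nodup)
    (hcov : ∀ y ∈ xs, P y = true → y ∈ S) :
    ((S.filter P).map (fun s => (xs.count s : Int))).sum = (xs.countP P : Int) := by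
  induction xs with
  | nil => simp [List.sum_eq_zero]
  | cons x xs ih =>
      have hcov' : ∀ y ∈ xs, P y = true → y ∈ S := fun y hy => hcov y (List.mem_cons_of_mem _ hy)
      have hsplit :
          ((S.filter P).map (fun s => ((x :: xs).count s : Int))).sum
            = ((S.filter P).map (fun s => (xs.count s : Int))).sum
              + ((S.filter P).map (fun s => if s == x then (1 : Int) else 0)).sum := by
        rw [← PySem.List.sum_map_add_int]
        refine congrArg List.sum (List.map_congr_left ?_)
        intro s _
        simp only [List.count_cons]
        push_cast
        split_ifs <;> simp_all [beq_iff_eq]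
      rw [hsplit, ih hcov', indicator_sum x P S hnd, List.countP_cons]
      by_cases hp : P x = true
      · have hx := hcov x List.mem_cons_self hp
        rw [if_pos ⟨hp, hx⟩, hp, if_pos rfl]
        push_cast; ring
      · rw [if_neg (fun h => hp h.1)]
        simp [hp]

-- B's two sums, through the counter characterisation.
theorem alt_sum (P : Char → Bool) (xs : List Char) :
    (((PySem.Dict.counter xs).items.filter (fun p => P p.1)).map (·.2)).sum
      = (xs.countP P : Int) := by
  rw [PySem.Dict.items_counter]
  rw [List.filter_map, List.map_map]
  have : ((fun p : Char × Int => P p.1) ∘ fun k => (k, (xs.count k : Int))) = P := rfl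
  rw [this]
  exact weighted_sum P xs _ (PySem.Set.nodup_ofList xs)
    (fun y hy _ => (PySem.Set.mem_ofList xs y).mpr hy)

-- ===== VERDICT (by name: the statement is the Claim_ definition above) =====
theorem licz_cyf_cenz_spec : Claim_equal_licz_cyf_cenz := by
  intro wejscie _
  show licz_cyf_cenz wejscie = licz_cyf_cenz_alt wejscie
  have hB : licz_cyf_cenz_alt wejscie =
      ((((PySem.Dict.counter wejscie.toList).items.filter
            (fun p => PySem.Chars.isalpha p.1)).map (·.2)).sum,
       (((PySem.Dict.counter wejscie.toList).items.filter
            (fun p => PySem.Chars.isdigit p.1)).map (·.2)).sum,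
       (PySem.Dict.counter wejscie.toList).getD '*' 0) := rfl
  rw [hB, alt_sum, alt_sum, PySem.Dict.getD_counter]
  unfold licz_cyf_cenz
  rw [foldA_eq]
  simp
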